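-- pv_equiv track=rewrite | github.com/monissiddiqui/EPIJudge | epi_judge_python/is_string_in_matrix.py | is_pattern_contained_in_grid
-- ===== SOURCE A (Python) =====
-- from typing import List
-- from itertools import product
--
-- def is_pattern_contained_in_grid(grid: List[List[int]],
--                                  pattern: List[int]) -> bool:
--     if not pattern : return True
--
--     m = len(grid)
--     n = len(grid[0])
--     directions = ((-1,0),(0,-1),(1,0),(0,1))
--
--     def searchForElement(x,y,i) -> bool :
--         if i == len(pattern) : return True
--         if (x,y,i) in previousAttempts: return False
--         previousAttempts.add((x,y,i))
--         for dx,dy in directions: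
--             if 0<= x+dx < m and 0 <= y+dy < n and \
--             pattern[i] == grid[x+dx][y+dy] and searchForElement(x+dx,y+dy,i+1) :
--                 return True
--         return False
--
--     previousAttempts = set()
--
--     for x,y in product(range(m),range(n)) :
--         if grid[x][y] == pattern[0] and searchForElement(x,y,1) :
--             return True
--     return False
-- ===== SOURCE B (Python) =====
-- def is_pattern_contained_in_grid(grid, pattern):
--     if not pattern:
--         return True
--     m, n = len(grid), len(grid[0])
--     frontier = {(x, y) for x in range(m) for y in range(n)
--                 if grid[x][y] == pattern[0]}
--     for p in pattern[1:]:
--         frontier = {(x, y) for x in range(m) for y in range(n)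
--                     if grid[x][y] == p and
--                     ((x - 1, y) in frontier or (x + 1, y) in frontier or
--                      (x, y - 1) in frontier or (x, y + 1) in frontier)}
--     return bool(frontier)
-- ===== Notes on version B (the rewrite author's own statement) =====
-- stated objective: simpler
-- what changed: Replaces the recursive DFS with a shared failed-state memo set by a forward layer-by-layer frontier pass: the set of cells matching pattern[i] that are 4-adjacent to the previous layer's set, returning whether the final frontier is non-empty.
-- outside the precondition, e.g. on is_pattern_contained_in_grid([[1, 2], [1]], [1]): A returns True, B raises IndexError
import Mathlib
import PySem

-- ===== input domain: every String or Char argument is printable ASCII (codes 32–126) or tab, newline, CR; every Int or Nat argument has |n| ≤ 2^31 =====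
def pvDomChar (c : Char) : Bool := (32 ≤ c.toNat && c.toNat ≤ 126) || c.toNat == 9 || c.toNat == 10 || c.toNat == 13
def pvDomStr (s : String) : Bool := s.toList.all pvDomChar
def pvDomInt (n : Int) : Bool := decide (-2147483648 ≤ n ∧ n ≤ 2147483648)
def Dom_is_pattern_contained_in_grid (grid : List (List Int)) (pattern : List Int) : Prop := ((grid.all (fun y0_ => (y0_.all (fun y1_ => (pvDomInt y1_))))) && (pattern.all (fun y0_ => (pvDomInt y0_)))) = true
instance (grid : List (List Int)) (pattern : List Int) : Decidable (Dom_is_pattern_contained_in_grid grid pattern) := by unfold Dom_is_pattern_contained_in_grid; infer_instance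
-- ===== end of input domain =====

-- B replaces A's memoized DFS by a forward frontier pass over pattern indices (simpler, iterative).

-- shared indexing helper: grid[x][y]; total with default 0 — every use in either port is
-- guarded by the 0 ≤ x < m, 0 ≤ y < n bounds checks the Pythons perform, and Pre_ makes the
-- guarded accesses in-range, so the default is never the value of a Python access that returns
def pvCell (grid : List (List Int)) (x y : Int) : Int :=
  (PySem.List.pyGet? ((PySem.List.pyGet? grid x).getD []) y).getD 0

-- the direction tuple ((-1,0),(0,-1),(1,0),(0,1)) of A (B spells the four neighbours out)
def pvDirs : List (Int × Int) := [(-1, 0), (0, -1), (1, 0), (0, 1)]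

-- product(range(m), range(n)) — the cell enumeration both Pythons perform
def pvCellsOf (m n : Int) : List (Int × Int) :=
  (PySem.List.pyRange 0 m 1).flatMap (fun x => (PySem.List.pyRange 0 n 1).map (fun y => (x, y)))

-- ===== PORT A =====
-- the `for dx,dy in directions` loop of searchForElement: early exit on True, memo threaded
def pvTryDirs (f : Int → Int → PySem.Set (Int × Int × Nat) → Bool × PySem.Set (Int × Int × Nat))
    (good : Int → Int → Bool) :
    List (Int × Int) → Int → Int → PySem.Set (Int × Int × Nat) → Bool × PySem.Set (Int × Int × Nat)
  | [], _, _, memo => (false, memo)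
  | (dx, dy) :: ds, x, y, memo =>
    if good (x + dx) (y + dy) then
      match f (x + dx) (y + dy) memo with
      | (true, memo') => (true, memo')
      | (false, memo') => pvTryDirs f good ds x y memo'
    else pvTryDirs f good ds x y memo

-- searchForElement; i is the Nat pattern index (Python's i, always ≥ 0); fuel only totalizes
-- the recursion (fuel ≥ len(pattern) - i on every reachable call, so the 0 branch never fires)
def pvSearchA (grid : List (List Int)) (pattern : List Int) (m n : Int) :
    Nat → Int → Int → Nat → PySem.Set (Int × Int × Nat) → Bool × PySem.Set (Int × Int × Nat)
  | fuel, x, y, i, memo =>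
    if i = pattern.length then (true, memo)
    else if PySem.Set.contains memo (x, y, i) then (false, memo)
    else
      match fuel with
      | 0 => (false, memo)
      | fuel + 1 =>
        pvTryDirs (fun a b mm => pvSearchA grid pattern m n fuel a b (i + 1) mm)
          (fun a b => decide (0 ≤ a ∧ a < m ∧ 0 ≤ b ∧ b < n) && (pattern.getD i 0 == pvCell grid a b))
          pvDirs x y (PySem.Set.add memo (x, y, i))

-- the outer `for x,y in product(range(m),range(n))` loop, memo shared across starts
def pvOuterA (grid : List (List Int)) (pattern : List Int) (m n : Int) :
    List (Int × Int) → PySem.Set (Int × Int × Nat) → Bool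
  | [], _ => false
  | (x, y) :: cs, memo =>
    if pvCell grid x y == pattern.getD 0 0 then
      match pvSearchA grid pattern m n pattern.length x y 1 memo with
      | (true, _) => true
      | (false, memo') => pvOuterA grid pattern m n cs memo'
    else pvOuterA grid pattern m n cs memo

def is_pattern_contained_in_grid (grid : List (List Int)) (pattern : List Int) : Bool :=
  if pattern.isEmpty then true
  else
    let m : Int := grid.length
    let n : Int := (grid.headD []).length   -- len(grid[0]); Pre_ excludes grid = [] here
    pvOuterA grid pattern m n (pvCellsOf m n) PySem.Set.empty

-- ===== PORT B =====
-- the neighbour membership test of B's set comprehension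
def pvNbrIn (F : PySem.Set (Int × Int)) (x y : Int) : Bool :=
  PySem.Set.contains F (x - 1, y) || PySem.Set.contains F (x + 1, y) ||
  PySem.Set.contains F (x, y - 1) || PySem.Set.contains F (x, y + 1)

def is_pattern_contained_in_grid_alt (grid : List (List Int)) (pattern : List Int) : Bool :=
  if pattern.isEmpty then true
  else
    let m : Int := grid.length
    let n : Int := (grid.headD []).length
    let cells := pvCellsOf m n
    let final := (pattern.drop 1).foldl
      (fun F p => PySem.Set.ofList (cells.filter
        (fun c => pvCell grid c.1 c.2 == p && pvNbrIn F c.1 c.2)))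
      (PySem.Set.ofList (cells.filter (fun c => pvCell grid c.1 c.2 == pattern.getD 0 0)))
    !final.isEmpty

-- ===== PRECONDITION & SPEC =====
-- Pre_ excludes: nonempty pattern with empty grid (A raises IndexError at len(grid[0])), and
-- grids with a row shorter than the first row, where A raises IndexError on most values and
-- returns only when the search happens to succeed before touching the short row (see cites).
def Pre_is_pattern_contained_in_grid (grid : List (List Int)) (pattern : List Int) : Prop :=
  pattern = [] ∨ (grid ≠ [] ∧ ∀ row ∈ grid, (grid.headD []).length ≤ row.length)
instance (grid : List (List Int)) (pattern : List Int) : Decidable (Pre_is_pattern_contained_in_grid grid pattern) := by unfold Pre_is_pattern_contained_in_grid; infer_instance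

def pvWitness_is_pattern_contained_in_grid : List (List Int) × List Int := ([[1, 2], [3, 1]], [1, 2, 1])

def Spec_is_pattern_contained_in_grid (grid : List (List Int)) (pattern : List Int) (out : Bool) : Prop := out = is_pattern_contained_in_grid_alt grid pattern
instance (grid : List (List Int)) (pattern : List Int) (out : Bool) : Decidable (Spec_is_pattern_contained_in_grid grid pattern out) := by unfold Spec_is_pattern_contained_in_grid; infer_instance

-- ===== CLAIM (what is proved, stated in full; the proofs are below) =====
def Claim_equal_is_pattern_contained_in_grid : Prop := ∀ (grid : List (List Int)) (pattern : List Int), Dom_is_pattern_contained_in_grid grid pattern → Pre_is_pattern_contained_in_grid grid pattern → Spec_is_pattern_contained_in_grid grid pattern (is_pattern_contained_in_grid grid pattern)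

-- ===== LEMMAS AND PROOFS =====

-- the specification both ports compute: existence of a walk from a neighbour chain
-- matching the remaining pattern (cells may repeat, exactly as in both Pythons)
def pvOk (grid : List (List Int)) (m n : Int) : List Int → Int → Int → Bool
  | [], _, _ => true
  | p :: rest, x, y => pvDirs.any (fun d =>
      (decide (0 ≤ x + d.1 ∧ x + d.1 < m ∧ 0 ≤ y + d.2 ∧ y + d.2 < n) &&
        (p == pvCell grid (x + d.1) (y + d.2))) && pvOk grid m n rest (x + d.1) (y + d.2))

lemma mem_pvCellsOf (m n : Int) (c : Int × Int) :
    c ∈ pvCellsOf m n ↔ 0 ≤ c.1 ∧ c.1 < m ∧ 0 ≤ c.2 ∧ c.2 < n := by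
  obtain ⟨x, y⟩ := c
  simp [pvCellsOf, List.mem_flatMap, List.mem_map, PySem.List.mem_pyRange_one]
  tauto

lemma pvOk_cons_iff (grid : List (List Int)) (m n : Int) (p : Int) (rest : List Int) (x y : Int) :
    pvOk grid m n (p :: rest) x y = true ↔
      ∃ d ∈ pvDirs, (0 ≤ x + d.1 ∧ x + d.1 < m ∧ 0 ≤ y + d.2 ∧ y + d.2 < n) ∧
        p = pvCell grid (x + d.1) (y + d.2) ∧ pvOk grid m n rest (x + d.1) (y + d.2) = true := by
  rw [pvOk]
  simp [List.any_eq_true]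
  tauto

-- A-side: the direction loop, abstracted over the recursive call f.
-- Q is the precondition the memo must satisfy for f to be correct; P is what f guarantees
-- about entries it adds; Okn is the truth value f computes.
lemma pvTryDirs_spec (f : Int → Int → PySem.Set (Int × Int × Nat) → Bool × PySem.Set (Int × Int × Nat))
    (good : Int → Int → Bool) (Okn : Int → Int → Bool) (P Q : Int × Int × Nat → Prop)
    (hPQ : ∀ s, P s → Q s)
    (hf : ∀ a b mm, (∀ s ∈ mm, Q s) →
      (f a b mm).1 = Okn a b ∧ ((f a b mm).1 = false → ∀ s ∈ (f a b mm).2, s ∈ mm ∨ P s)) :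
    ∀ (ds : List (Int × Int)) (x y : Int) (memo : PySem.Set (Int × Int × Nat)),
      (∀ s ∈ memo, Q s) →
      (pvTryDirs f good ds x y memo).1
        = ds.any (fun d => good (x + d.1) (y + d.2) && Okn (x + d.1) (y + d.2)) ∧
      ((pvTryDirs f good ds x y memo).1 = false →
        ∀ s ∈ (pvTryDirs f good ds x y memo).2, s ∈ memo ∨ P s) := by
  intro ds
  induction ds with
  | nil => intro x y memo _; exact ⟨by simp [pvTryDirs], fun _ s hs => Or.inl hs⟩
  | cons d ds ih =>
    intro x y memo hmemo
    obtain ⟨dx, dy⟩ := d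
    rw [pvTryDirs]
    by_cases hg : good (x + dx) (y + dy) = true
    · simp only [hg]
      obtain ⟨hf1, hf2⟩ := hf (x + dx) (y + dy) memo hmemo
      rcases hr : f (x + dx) (y + dy) memo with ⟨r, memo'⟩
      rw [hr] at hf1 hf2
      cases r with
      | true =>
        simp only [List.any_cons, hg, Bool.true_and, ← hf1, Bool.true_or]
        exact ⟨rfl, by intro h; simp at h⟩
      | false =>
        have hmemo' : ∀ s ∈ memo', Q s := by
          intro s hs
          rcases hf2 rfl s hs with h | h
          · exact hmemo s h
          · exact hPQ s h
        obtain ⟨ih1, ih2⟩ := ih x y memo' hmemo'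
        constructor
        · simp only [List.any_cons, hg, Bool.true_and, ← hf1, Bool.false_or]; exact ih1
        · intro hfalse s hs
          rcases ih2 hfalse s hs with h | h
          · rcases hf2 rfl s h with h' | h'
            · exact Or.inl h'
            · exact Or.inr h'
          · exact Or.inr h
    · simp only [Bool.not_eq_true] at hg
      simp only [hg, Bool.false_eq_true, if_false]
      obtain ⟨ih1, ih2⟩ := ih x y memo hmemo
      exact ⟨by simp only [List.any_cons, hg, Bool.false_and, Bool.false_or]; exact ih1, ih2⟩

-- A-side: searchForElement computes pvOk, and every entry a failed search leaves in the
-- memo is a genuinely failed state (the memo-soundness invariant).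
lemma pvSearchA_spec (grid : List (List Int)) (pattern : List Int) (m n : Int) :
    ∀ (fuel : Nat) (i : Nat), i ≤ pattern.length → pattern.length - i ≤ fuel →
    ∀ (x y : Int) (memo : PySem.Set (Int × Int × Nat)),
      (∀ s ∈ memo, i ≤ s.2.2 → pvOk grid m n (pattern.drop s.2.2) s.1 s.2.1 = false) →
      (pvSearchA grid pattern m n fuel x y i memo).1 = pvOk grid m n (pattern.drop i) x y ∧
      ((pvSearchA grid pattern m n fuel x y i memo).1 = false →
        ∀ s ∈ (pvSearchA grid pattern m n fuel x y i memo).2,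
          s ∈ memo ∨ (i ≤ s.2.2 ∧ pvOk grid m n (pattern.drop s.2.2) s.1 s.2.1 = false)) := by
  intro fuel
  induction fuel with
  | zero =>
    intro i hi hfuel x y memo hmemo
    have : i = pattern.length := by omega
    subst this
    rw [pvSearchA]
    simp [List.drop_length, pvOk]
  | succ fuel ih =>
    intro i hi hfuel x y memo hmemo
    rw [pvSearchA]
    by_cases hlen : i = pattern.length
    · subst hlen; simp [List.drop_length, pvOk]
    · simp only [hlen, if_false]
      by_cases hmem : PySem.Set.contains memo (x, y, i) = true
      · have hin : (x, y, i) ∈ memo := (PySem.Set.contains_iff memo (x, y, i)).mp hmem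
        simp only [hmem, if_true]
        refine ⟨(hmemo _ hin (le_refl i)).symm, fun _ s hs => Or.inl hs⟩
      · simp only [Bool.not_eq_true] at hmem
        simp only [hmem, Bool.false_eq_true, if_false]
        have hilt : i < pattern.length := by omega
        have hmemo1 : ∀ s ∈ PySem.Set.add memo (x, y, i), i + 1 ≤ s.2.2 →
            pvOk grid m n (pattern.drop s.2.2) s.1 s.2.1 = false := by
          intro s hs hj
          rcases (PySem.Set.mem_add _ _ _).mp hs with h | h
          · exact hmemo s h (by omega)
          · exfalso; rw [h] at hj; simp at hj
        have H := pvTryDirs_spec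
          (fun a b mm => pvSearchA grid pattern m n fuel a b (i + 1) mm)
          (fun a b => decide (0 ≤ a ∧ a < m ∧ 0 ≤ b ∧ b < n) && (pattern.getD i 0 == pvCell grid a b))
          (fun a b => pvOk grid m n (pattern.drop (i + 1)) a b)
          (fun s => i + 1 ≤ s.2.2 ∧ pvOk grid m n (pattern.drop s.2.2) s.1 s.2.1 = false)
          (fun s => i + 1 ≤ s.2.2 → pvOk grid m n (pattern.drop s.2.2) s.1 s.2.1 = false)
          (fun s hP _ => hP.2)
          (fun a b mm hmm => ih (i + 1) (by omega) (by omega) a b mm hmm)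
          pvDirs x y (PySem.Set.add memo (x, y, i)) hmemo1
        obtain ⟨H1, H2⟩ := H
        have hok : pvOk grid m n (pattern.drop i) x y
            = (pvDirs.any fun d =>
                (decide (0 ≤ x + d.1 ∧ x + d.1 < m ∧ 0 ≤ y + d.2 ∧ y + d.2 < n) &&
                  (pattern.getD i 0 == pvCell grid (x + d.1) (y + d.2))) &&
                pvOk grid m n (pattern.drop (i + 1)) (x + d.1) (y + d.2)) := by
          rw [List.drop_eq_getElem_cons hilt, pvOk, List.getD_eq_getElem pattern 0 hilt]
        refine ⟨by rw [H1, hok], ?_⟩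
        intro hfalse s hs
        rcases H2 hfalse s hs with h | h
        · rcases (PySem.Set.mem_add _ _ _).mp h with h' | h'
          · exact Or.inl h'
          · refine Or.inr ?_
            rw [h']
            refine ⟨le_refl i, ?_⟩
            simpa using (hok ▸ (H1 ▸ hfalse))
        · exact Or.inr ⟨by omega, h.2⟩

-- A-side: the outer product loop returns "some start cell matches pattern[0] and pvOk holds"
lemma pvOuterA_spec (grid : List (List Int)) (pattern : List Int) (m n : Int)
    (hlen : 1 ≤ pattern.length) :
    ∀ (cells : List (Int × Int)) (memo : PySem.Set (Int × Int × Nat)),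
      (∀ s ∈ memo, 1 ≤ s.2.2 → pvOk grid m n (pattern.drop s.2.2) s.1 s.2.1 = false) →
      pvOuterA grid pattern m n cells memo
        = cells.any (fun c => (pvCell grid c.1 c.2 == pattern.getD 0 0) &&
            pvOk grid m n (pattern.drop 1) c.1 c.2) := by
  intro cells
  induction cells with
  | nil => intro memo _; simp [pvOuterA]
  | cons c cs ih =>
    intro memo hmemo
    obtain ⟨x, y⟩ := c
    rw [pvOuterA]
    obtain ⟨H1, H2⟩ := pvSearchA_spec grid pattern m n pattern.length 1 hlen (by omega)
      x y memo hmemo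
    by_cases hc : (pvCell grid x y == pattern.getD 0 0) = true
    · simp only [hc, if_true]
      rcases hr : pvSearchA grid pattern m n pattern.length x y 1 memo with ⟨r, memo'⟩
      rw [hr] at H1 H2
      cases r with
      | true =>
        simp only [List.any_cons, hc, Bool.true_and, ← H1, Bool.true_or]
      | false =>
        have hmemo' : ∀ s ∈ memo', 1 ≤ s.2.2 →
            pvOk grid m n (pattern.drop s.2.2) s.1 s.2.1 = false := by
          intro s hs hj
          rcases H2 rfl s hs with h | h
          · exact hmemo s h hj
          · exact h.2
        show pvOuterA grid pattern m n cs memo' = _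
        rw [ih memo' hmemo']
        simp only [List.any_cons, hc, Bool.true_and, ← H1, Bool.false_or]
    · simp only [Bool.not_eq_true] at hc
      simp only [hc, Bool.false_eq_true, if_false]
      rw [ih memo hmemo]
      simp only [List.any_cons, hc, Bool.false_and, Bool.false_or]

-- B-side: stepping one layer back — a cell of the new frontier certifies pvOk (p :: rest)
-- at the neighbour it came from (the four directions are closed under negation)
lemma pvBack (grid : List (List Int)) (m n : Int) (p : Int) (rest : List Int) (u v : Int)
    (hb : 0 ≤ u ∧ u < m ∧ 0 ≤ v ∧ v < n) (hp : p = pvCell grid u v)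
    (hok : pvOk grid m n rest u v = true) (d : Int × Int) (hd : d ∈ pvDirs) :
    pvOk grid m n (p :: rest) (u - d.1) (v - d.2) = true := by
  apply (pvOk_cons_iff grid m n p rest _ _).mpr
  refine ⟨d, hd, ?_, ?_, ?_⟩
  · constructor
    · omega
    · constructor
      · omega
      · constructor <;> omega
  · have h1 : u - d.1 + d.1 = u := by ring
    have h2 : v - d.2 + d.2 = v := by ring
    rw [h1, h2]; exact hp
  · have h1 : u - d.1 + d.1 = u := by ring
    have h2 : v - d.2 + d.2 = v := by ring
    rw [h1, h2]; exact hok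

-- B-side: one frontier step preserves the "some frontier cell continues the pattern" reading
lemma pvStep_iff (grid : List (List Int)) (m n : Int) (p : Int) (rest : List Int)
    (F : PySem.Set (Int × Int)) :
    (∃ c' ∈ PySem.Set.ofList ((pvCellsOf m n).filter
        (fun c => pvCell grid c.1 c.2 == p && pvNbrIn F c.1 c.2)),
      pvOk grid m n rest c'.1 c'.2 = true)
    ↔ (∃ c ∈ F, pvOk grid m n (p :: rest) c.1 c.2 = true) := by
  constructor
  · rintro ⟨⟨u, v⟩, hc', hok⟩
    have hm := (PySem.Set.mem_ofList _ _).mp hc'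
    rw [List.mem_filter] at hm
    obtain ⟨hcell, hcond⟩ := hm
    rw [mem_pvCellsOf] at hcell
    simp only [Bool.and_eq_true, beq_iff_eq] at hcond
    obtain ⟨hp, hnbr⟩ := hcond
    rw [pvNbrIn] at hnbr
    simp only [Bool.or_eq_true, PySem.Set.contains_iff] at hnbr
    simp only at hp hok
    rcases hnbr with ((h | h) | h) | h
    · exact ⟨(u - 1, v), h,
        by simpa using pvBack grid m n p rest u v hcell hp.symm hok (1, 0) (by simp [pvDirs])⟩
    · exact ⟨(u + 1, v), h,
        by simpa using pvBack grid m n p rest u v hcell hp.symm hok (-1, 0) (by simp [pvDirs])⟩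
    · exact ⟨(u, v - 1), h,
        by simpa using pvBack grid m n p rest u v hcell hp.symm hok (0, 1) (by simp [pvDirs])⟩
    · exact ⟨(u, v + 1), h,
        by simpa using pvBack grid m n p rest u v hcell hp.symm hok (0, -1) (by simp [pvDirs])⟩
  · rintro ⟨⟨a, b⟩, hF, hok⟩
    rw [pvOk_cons_iff] at hok
    obtain ⟨d, hd, hbnd, hp, hrest⟩ := hok
    refine ⟨(a + d.1, b + d.2), ?_, hrest⟩
    apply (PySem.Set.mem_ofList _ _).mpr
    rw [List.mem_filter]
    refine ⟨(mem_pvCellsOf m n _).mpr hbnd, ?_⟩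
    simp only [Bool.and_eq_true, beq_iff_eq]
    refine ⟨hp.symm, ?_⟩
    rw [pvNbrIn]
    simp only [Bool.or_eq_true, PySem.Set.contains_iff]
    simp only [pvDirs, List.mem_cons, List.not_mem_nil, or_false] at hd
    rcases hd with h | h | h | h <;> subst h <;> simp only
    · left; left; right; convert hF using 2 <;> ring
    · right; convert hF using 2 <;> ring
    · left; left; left; convert hF using 2 <;> ring
    · left; right; convert hF using 2 <;> ring

-- B-side: the frontier fold is non-empty iff some cell of the initial frontier
-- starts a walk matching the remaining pattern
lemma pvFrontier_spec (grid : List (List Int)) (m n : Int) :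
    ∀ (rest : List Int) (F : PySem.Set (Int × Int)),
      ((rest.foldl (fun F p => PySem.Set.ofList ((pvCellsOf m n).filter
          (fun c => pvCell grid c.1 c.2 == p && pvNbrIn F c.1 c.2))) F).isEmpty = false)
        ↔ ∃ c ∈ F, pvOk grid m n rest c.1 c.2 = true := by
  intro rest
  induction rest with
  | nil =>
    intro F
    rcases F with _ | ⟨c, F⟩
    · simp
    · exact ⟨fun _ => ⟨c, List.mem_cons_self, by rw [pvOk]⟩, fun _ => rfl⟩
  | cons p rest ih =>
    intro F
    rw [List.foldl_cons, ih, pvStep_iff]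

-- the two ports agree on every input (the theorem below only needs it under Pre_)
lemma pvMain (grid : List (List Int)) (pattern : List Int) :
    is_pattern_contained_in_grid grid pattern = is_pattern_contained_in_grid_alt grid pattern := by
  cases pattern with
  | nil => rfl
  | cons p ps =>
    rw [is_pattern_contained_in_grid, is_pattern_contained_in_grid_alt]
    simp only [List.isEmpty_cons, Bool.false_eq_true, if_false]
    rw [pvOuterA_spec grid (p :: ps) (grid.length : Int) ((grid.headD []).length : Int)
      (by simp) (pvCellsOf _ _) PySem.Set.empty
      (fun s hs => absurd hs (by simp [PySem.Set.empty]))]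
    refine Bool.eq_iff_iff.mpr ?_
    rw [List.any_eq_true, Bool.not_eq_true']
    rw [pvFrontier_spec grid (grid.length : Int) ((grid.headD []).length : Int)]
    simp only [PySem.Set.mem_ofList, List.mem_filter, Bool.and_eq_true]
    constructor
    · rintro ⟨c, hc, hbeq, hok⟩; exact ⟨c, ⟨hc, hbeq⟩, hok⟩
    · rintro ⟨c, ⟨hc, hbeq⟩, hok⟩; exact ⟨c, hc, hbeq, hok⟩

-- ===== VERDICT (by name: the statement is the Claim_ definition above) =====
theorem is_pattern_contained_in_grid_spec : Claim_equal_is_pattern_contained_in_grid := by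
  intro grid pattern _ _
  exact pvMain grid pattern
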